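-- pv_equiv track=rewrite | github.com/lfpc/BlackBoxOptimization | utils/__init__.py | get_split_indices
-- ===== SOURCE A (Python) =====
-- def get_split_indices(num_splits, N):
--     '''Get indices that divide array of size N into num_splits splits.
--     If R := N%num_splits > 0, the rest is divided into the R new divisions'''
--     base_size = N // num_splits
--     remainder = N % num_splits
--     sizes = [base_size + 1 if i < remainder else base_size for i in range(num_splits)]
--     indices = []
--     start_idx = 0
--     for size in sizes:
--         end_idx = start_idx + size
--         indices.append((start_idx, end_idx))
--         start_idx = end_idx
--     return indices
-- ===== SOURCE B (Python) =====
-- def get_split_indices(num_splits, N):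
--     '''Get indices that divide array of size N into num_splits splits.
--     If R := N%num_splits > 0, the rest is divided into the R new divisions'''
--     base = N // num_splits
--     rem = N % num_splits
--     return [(i * base + min(i, rem), (i + 1) * base + min(i + 1, rem))
--             for i in range(num_splits)]
-- ===== Notes on version B (the rewrite author's own statement) =====
-- stated objective: alternative
-- what changed: Replaced the sizes list and the sequential start_idx accumulator by a closed-form boundary: each pair (i*base+min(i,rem), (i+1)*base+min(i+1,rem)) is computed independently from the index i.
import Mathlib
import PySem

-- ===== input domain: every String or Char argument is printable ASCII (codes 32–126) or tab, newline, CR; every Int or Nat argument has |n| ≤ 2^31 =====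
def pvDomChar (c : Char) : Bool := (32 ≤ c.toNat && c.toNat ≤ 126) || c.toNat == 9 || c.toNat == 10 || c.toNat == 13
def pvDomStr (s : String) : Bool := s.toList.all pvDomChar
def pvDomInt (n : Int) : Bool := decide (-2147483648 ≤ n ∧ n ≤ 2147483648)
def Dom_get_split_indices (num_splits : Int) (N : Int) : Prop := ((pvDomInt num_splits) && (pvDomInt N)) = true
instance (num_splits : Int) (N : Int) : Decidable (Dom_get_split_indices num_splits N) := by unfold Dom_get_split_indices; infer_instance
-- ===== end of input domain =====

-- B replaces A's sizes list and running start_idx accumulator by an independent closed-form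
-- boundary per index (alternative decomposition, same cost).

-- ===== PORT A =====
def get_split_indices (num_splits : Int) (N : Int) : List (Int × Int) :=
  let base_size := PySem.Int.floordiv N num_splits
  let remainder := PySem.Int.mod N num_splits
  let sizes := (PySem.List.pyRange 0 num_splits 1).map
    (fun i => if i < remainder then base_size + 1 else base_size)
  let r := sizes.foldl
    (fun (st : List (Int × Int) × Int) size =>
      (st.1 ++ [(st.2, st.2 + size)], st.2 + size)) ([], 0)
  r.1

-- ===== PORT B =====
def get_split_indices_alt (num_splits : Int) (N : Int) : List (Int × Int) :=
  let base := PySem.Int.floordiv N num_splits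
  let rem := PySem.Int.mod N num_splits
  (PySem.List.pyRange 0 num_splits 1).map
    (fun i => (i * base + min i rem, (i + 1) * base + min (i + 1) rem))

-- ===== PRECONDITION & SPEC =====
-- num_splits = 0 makes Python's N // num_splits raise ZeroDivisionError (in A and in B alike).
def Pre_get_split_indices (num_splits : Int) (N : Int) : Prop := num_splits ≠ 0
instance (num_splits : Int) (N : Int) : Decidable (Pre_get_split_indices num_splits N) := by
  unfold Pre_get_split_indices; infer_instance
def pvWitness_get_split_indices : Int × Int := (3, 10)

def Spec_get_split_indices (num_splits : Int) (N : Int) (out : List (Int × Int)) : Prop :=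
  out = get_split_indices_alt num_splits N
instance (num_splits : Int) (N : Int) (out : List (Int × Int)) :
    Decidable (Spec_get_split_indices num_splits N out) := by
  unfold Spec_get_split_indices; infer_instance

-- ===== CLAIM (what is proved, stated in full; the proofs are below) =====
def Claim_equal_get_split_indices : Prop := ∀ (num_splits : Int) (N : Int),
  Dom_get_split_indices num_splits N → Pre_get_split_indices num_splits N →
  Spec_get_split_indices num_splits N (get_split_indices num_splits N)

-- ===== LEMMAS AND PROOFS =====

-- fold invariant: after processing range(0, m), the accumulator's pairs are B's closed-form
-- pairs and the running start index is m*base + min m rem (needs 0 ≤ rem).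
theorem gsi_fold_invariant (base rem : Int) (hrem : 0 ≤ rem) (m : Nat) :
    ((PySem.List.pyRange 0 (m : Int) 1).map
        (fun i => if i < rem then base + 1 else base)).foldl
      (fun (st : List (Int × Int) × Int) size =>
        (st.1 ++ [(st.2, st.2 + size)], st.2 + size)) ([], 0)
    = ((PySem.List.pyRange 0 (m : Int) 1).map
        (fun i => (i * base + min i rem, (i + 1) * base + min (i + 1) rem)),
       (m : Int) * base + min (m : Int) rem) := by
  induction m with
  | zero => simp [PySem.List.pyRange_one_eq_nil]; omega
  | succ m ih =>
    have h : ((m : Int) + 1) = ((m + 1 : Nat) : Int) := by push_cast; ring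
    rw [← h, PySem.List.pyRange_one_succ_right (by positivity)]
    simp only [List.map_append, List.foldl_append, ih, List.map_cons, List.map_nil,
      List.foldl_cons, List.foldl_nil]
    have key : (m : Int) * base + min (m : Int) rem
          + (if (m : Int) < rem then base + 1 else base)
        = ((m : Int) + 1) * base + min ((m : Int) + 1) rem := by
      rw [Int.min_def, Int.min_def]; split_ifs <;> nlinarith
    rw [key]

-- ===== VERDICT (by name: the statement is the Claim_ definition above) =====
theorem get_split_indices_spec : Claim_equal_get_split_indices := by
  intro ns N _ hpre
  unfold Spec_get_split_indices get_split_indices get_split_indices_alt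
  simp only []
  by_cases hpos : 0 < ns
  · have hrem : 0 ≤ PySem.Int.mod N ns := PySem.Int.mod_nonneg N hpos
    have hns : ns = (ns.toNat : Int) := by omega
    rw [hns] at hrem ⊢
    rw [gsi_fold_invariant _ _ hrem]
  · have : ns < 0 := by unfold Pre_get_split_indices at hpre; omega
    rw [PySem.List.pyRange_one_eq_nil (by omega)]
    simp
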